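-- pv_equiv track=rewrite | github.com/joy7758/agent-evidence | agent_evidence/oap.py | _issue_summary
-- ===== SOURCE A (Python) =====
-- def _issue_summary(issues: list[dict[str, str]]) -> dict[str, dict[str, int]]:
--     by_stage: dict[str, int] = {}
--     by_code: dict[str, int] = {}
--     for issue in issues:
--         by_stage[issue["stage"]] = by_stage.get(issue["stage"], 0) + 1
--         by_code[issue["code"]] = by_code.get(issue["code"], 0) + 1
--     return {
--         "by_stage": dict(sorted(by_stage.items())),
--         "by_code": dict(sorted(by_code.items())),
--     }
-- ===== SOURCE B (Python) =====
-- def _issue_summary(issues: list[dict[str, str]]) -> dict[str, dict[str, int]]: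
--     # sort-then-group: sort the values of each key, then count runs of equal
--     # values in one linear scan; keys come out already ascending.
--     def tally(key: str) -> dict[str, int]:
--         ks = sorted(issue[key] for issue in issues)
--         out: dict[str, int] = {}
--         i, n = 0, len(ks)
--         while i < n:
--             j = i
--             while j < n and ks[j] == ks[i]:
--                 j += 1
--             out[ks[i]] = j - i
--             i = j
--         return out
--
--     return {"by_stage": tally("stage"), "by_code": tally("code")}
-- ===== Notes on version B (the rewrite author's own statement) =====
-- stated objective: alternative
-- what changed: Replaces the fused hash-counting loop plus items()-sort with two sort-then-group passes: the values of each key are sorted first and equal runs are counted in one linear scan, so keys emerge already ascending and no separate sort of the counter is needed.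
import Mathlib
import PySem

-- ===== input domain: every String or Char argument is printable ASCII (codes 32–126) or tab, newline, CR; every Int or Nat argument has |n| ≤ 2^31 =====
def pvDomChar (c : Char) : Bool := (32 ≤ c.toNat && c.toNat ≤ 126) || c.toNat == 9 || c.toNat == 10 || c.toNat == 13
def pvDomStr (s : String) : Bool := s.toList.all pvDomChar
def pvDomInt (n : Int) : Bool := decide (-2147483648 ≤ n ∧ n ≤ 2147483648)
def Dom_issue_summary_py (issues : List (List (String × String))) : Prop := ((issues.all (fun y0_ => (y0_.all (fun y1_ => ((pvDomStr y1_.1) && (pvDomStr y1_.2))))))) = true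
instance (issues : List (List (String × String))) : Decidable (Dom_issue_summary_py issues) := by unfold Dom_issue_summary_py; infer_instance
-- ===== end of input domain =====

-- B replaces A's fused hash-counting loop + items() sort by two sort-then-group passes
-- (sort the key's values, count runs in one scan); an alternative of similar cost.


-- ===== PORT A =====
-- issue["stage"] on the association-list dict: first-match lookup; total with "" default,
-- Pre_ guarantees the key is present so the default is never taken.
def pyLookup (issue : List (String × String)) (k : String) : String :=
  ((PySem.Dict.mk issue).get? k).getD ""

def issue_summary_py (issues : List (List (String × String))) : List (String × List (String × Int)) :=
  let p := issues.foldl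
    (fun (acc : PySem.Dict String Int × PySem.Dict String Int) issue =>
      (acc.1.insert (pyLookup issue "stage") (acc.1.getD (pyLookup issue "stage") 0 + 1),
       acc.2.insert (pyLookup issue "code") (acc.2.getD (pyLookup issue "code") 0 + 1)))
    (PySem.Dict.empty, PySem.Dict.empty)
  [("by_stage", PySem.List.sorted2 p.1.items Prod.fst Prod.snd false),
   ("by_code",  PySem.List.sorted2 p.2.items Prod.fst Prod.snd false)]

-- ===== PORT B =====
-- the inner while-loop of Source B: count the run of values equal to the head, recurse on the rest
def runsB : List String → List (String × Int)
  | [] => []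
  | k :: t =>
      (k, 1 + ((t.takeWhile (fun x => x == k)).length : Int)) :: runsB (t.dropWhile (fun x => x == k))
termination_by ys => ys.length
decreasing_by
  simp only [List.length_cons]
  exact Nat.lt_succ_of_le (List.Sublist.length_le (List.dropWhile_sublist _))

def tallyB (issues : List (List (String × String))) (key : String) : List (String × Int) :=
  runsB (PySem.List.sorted (issues.map (fun issue => pyLookup issue key)) (fun x => x) false)

def issue_summary_py_alt (issues : List (List (String × String))) : List (String × List (String × Int)) :=
  [("by_stage", tallyB issues "stage"), ("by_code", tallyB issues "code")]

-- ===== PRECONDITION & SPEC =====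
-- Pre_ excludes exactly the inputs where A raises KeyError: an issue dict missing "stage" or "code".
def Pre_issue_summary_py (issues : List (List (String × String))) : Prop :=
  ∀ issue ∈ issues, "stage" ∈ issue.map Prod.fst ∧ "code" ∈ issue.map Prod.fst
instance (issues : List (List (String × String))) : Decidable (Pre_issue_summary_py issues) := by
  unfold Pre_issue_summary_py; infer_instance

def pvWitness_issue_summary_py : (List (List (String × String))) :=
  [[("stage", "plan"), ("code", "E1")], [("stage", "run"), ("code", "E1")]]

def Spec_issue_summary_py (issues : List (List (String × String))) (out : List (String × List (String × Int))) : Prop := out = issue_summary_py_alt issues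
instance (issues : List (List (String × String))) (out : List (String × List (String × Int))) : Decidable (Spec_issue_summary_py issues out) := by unfold Spec_issue_summary_py; infer_instance

-- ===== CLAIM (what is proved, stated in full; the proofs are below) =====
def Claim_equal_issue_summary_py : Prop := ∀ (issues : List (List (String × String))), Dom_issue_summary_py issues → Pre_issue_summary_py issues → Spec_issue_summary_py issues (issue_summary_py issues)

-- ===== LEMMAS AND PROOFS =====

theorem fold_split : ∀ (l : List (List (String × String))) (d1 d2 : PySem.Dict String Int),
    l.foldl (fun acc issue =>
        (acc.1.insert (pyLookup issue "stage") (acc.1.getD (pyLookup issue "stage") 0 + 1),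
         acc.2.insert (pyLookup issue "code") (acc.2.getD (pyLookup issue "code") 0 + 1))) (d1, d2)
      = (l.foldl (fun d issue => d.insert (pyLookup issue "stage") (d.getD (pyLookup issue "stage") 0 + 1)) d1,
         l.foldl (fun d issue => d.insert (pyLookup issue "code") (d.getD (pyLookup issue "code") 0 + 1)) d2) := by
  intro l
  induction l with
  | nil => intro d1 d2; rfl
  | cons x t ih => intro d1 d2; simp only [List.foldl]; exact ih _ _

-- A's counting loop over one key is Counter of the mapped key values
theorem foldl_insert_key_eq_counter {β : Type} (l : List β) (key : β → String) :
    l.foldl (fun (d : PySem.Dict String Int) i => d.insert (key i) (d.getD (key i) 0 + 1))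
        PySem.Dict.empty
      = PySem.Dict.counter (l.map key) := by
  rw [← PySem.Dict.foldl_insert_getD_add_one_eq_counter, List.foldl_map]

theorem runsB_nil : runsB [] = [] := by
  unfold runsB
  rfl

theorem runsB_cons (k : String) (t : List String) :
    runsB (k :: t) = (k, 1 + ((t.takeWhile (fun x => x == k)).length : Int))
      :: runsB (t.dropWhile (fun x => x == k)) := by
  conv_lhs => unfold runsB

theorem insertBy_perm {α : Type} (b : α → α → Bool) (x : α) (ys : List α) :
    (PySem.List.insertBy b x ys).Perm (x :: ys) := by
  induction ys with
  | nil => simp [PySem.List.insertBy]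
  | cons y t ih =>
      simp only [PySem.List.insertBy]
      split
      · exact List.Perm.refl _
      · exact (ih.cons y).trans (List.Perm.swap x y t)

theorem insertBy_congr {α : Type} (b1 b2 : α → α → Bool) (x : α) (ys : List α)
    (h : ∀ y ∈ ys, b1 x y = b2 x y) :
    PySem.List.insertBy b1 x ys = PySem.List.insertBy b2 x ys := by
  induction ys with
  | nil => rfl
  | cons y t ih =>
      simp only [PySem.List.insertBy]
      rw [h y (by simp)]
      split
      · rfl
      · rw [ih (fun z hz => h z (by simp [hz]))]

theorem foldl_insertBy_congr {α : Type} (b1 b2 : α → α → Bool) :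
    ∀ (l acc : List α),
    (∀ x ∈ l, ∀ y, (y ∈ acc ∨ y ∈ l) → x ≠ y → b1 x y = b2 x y) →
    (acc ++ l).Nodup →
    l.foldl (fun a x => PySem.List.insertBy b1 x a) acc
      = l.foldl (fun a x => PySem.List.insertBy b2 x a) acc := by
  intro l
  induction l with
  | nil => intro acc _ _; rfl
  | cons x t ih =>
      intro acc h hnd
      have hperm : (acc ++ x :: t).Perm (x :: (acc ++ t)) :=
        List.perm_middle (a := x) (l₁ := acc) (l₂ := t)
      have hnd' : (x :: (acc ++ t)).Nodup := hperm.nodup_iff.mp hnd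
      have hx : ∀ y ∈ acc, b1 x y = b2 x y := by
        intro y hy
        refine h x (by simp) y (Or.inl hy) ?_
        intro hxy
        subst hxy
        exact (List.nodup_cons.mp hnd').1 (by simp [hy])
      simp only [List.foldl]
      rw [insertBy_congr b1 b2 x acc hx]
      set acc' := PySem.List.insertBy b2 x acc with hacc'
      have hperm' : acc'.Perm (x :: acc) := insertBy_perm b2 x acc
      have hnd2 : (acc' ++ t).Nodup := by
        refine ((hperm'.append_right t).nodup_iff).mpr ?_
        have h2 : ((x :: acc) ++ t).Perm (acc ++ x :: t) := by
          simpa using List.perm_middle (a := x) (l₁ := acc) (l₂ := t) |>.symm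
        exact h2.nodup_iff.mpr hnd
      refine ih acc' ?_ hnd2
      intro z hz y hy hzy
      refine h z (by simp [hz]) y ?_ hzy
      rcases hy with hy | hy
      · rcases List.mem_cons.mp (hperm'.mem_iff.mp hy) with hy1 | hy1
        · exact Or.inr (by simp [hy1])
        · exact Or.inl hy1
      · exact Or.inr (by simp [hy])

-- with pairwise-distinct first keys the lexicographic tuple sort is the sort by the first key
theorem sorted2_eq_sorted_fst {α κ₁ κ₂ : Type} [LinearOrder κ₁] [LinearOrder κ₂]
    (xs : List α) (k1 : α → κ₁) (k2 : α → κ₂) (hnd : (xs.map k1).Nodup) :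
    PySem.List.sorted2 xs k1 k2 false = PySem.List.sorted xs k1 false := by
  have hinj : ∀ x ∈ xs, ∀ y ∈ xs, k1 x = k1 y → x = y := List.inj_on_of_nodup_map hnd
  have hndxs : xs.Nodup := List.Nodup.of_map k1 hnd
  show xs.foldl (fun a x => PySem.List.insertBy _ x a) [] = xs.foldl (fun a x => PySem.List.insertBy _ x a) []
  refine foldl_insertBy_congr _ _ xs [] ?_ (by exact hndxs)
  intro x hx y hy hxy
  have hy' : y ∈ xs := by
    rcases hy with hy | hy
    · simp at hy
    · exact hy
  have hk : k1 x ≠ k1 y := fun he => hxy (hinj x hx y hy' he)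
  rcases lt_trichotomy (k1 x) (k1 y) with h | h | h
  · simp [h, not_lt_of_gt h]
  · exact absurd h hk
  · have h1 : ¬ k1 x < k1 y := not_lt_of_gt h
    simp [h1]
    intro hle
    exact absurd (lt_of_lt_of_le h hle) (lt_irrefl _)

theorem dropWhile_gt {k : String} (t : List String)
    (hp : (k :: t).Pairwise (· ≤ ·)) : ∀ x ∈ t.dropWhile (fun y => y == k), k < x := by
  have hle : ∀ z ∈ t, k ≤ z := (List.pairwise_cons.mp hp).1
  have hpt : t.Pairwise (· ≤ ·) := (List.pairwise_cons.mp hp).2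
  have hpd : (t.dropWhile (fun y => y == k)).Pairwise (· ≤ ·) :=
    hpt.sublist (List.dropWhile_sublist _)
  intro x hx
  cases hd : t.dropWhile (fun y => y == k) with
  | nil => rw [hd] at hx; simp at hx
  | cons h r =>
      have hne : t.dropWhile (fun y => y == k) ≠ [] := by simp [hd]
      have h1 := List.head_dropWhile_not (l := t) (p := fun y => y == k) hne
      have h2 : (t.dropWhile (fun y => y == k)).head hne = h := by
        simp only [hd, List.head_cons]
      rw [h2] at h1
      have hhk : h ≠ k := by simpa using h1
      have hht : h ∈ t := (List.dropWhile_sublist _).subset (by rw [hd]; simp)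
      have hkh : k < h := lt_of_le_of_ne (hle h hht) (Ne.symm hhk)
      rw [hd] at hx
      rcases List.mem_cons.mp hx with rfl | hxr
      · exact hkh
      · have hhx : h ≤ x := by
          rw [hd] at hpd
          exact (List.pairwise_cons.mp hpd).1 x hxr
        exact lt_of_lt_of_le hkh hhx

theorem runsB_sorted_aux : ∀ (n : Nat) (ys : List String), ys.length ≤ n → ys.Pairwise (· ≤ ·) →
    runsB ys = (PySem.List.sorted (PySem.Set.ofList ys) (fun x => x) false).map
      (fun k => (k, (ys.count k : Int))) := by
  intro n
  induction n with
  | zero =>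
      intro ys hl _
      have hnil : ys = [] := List.eq_nil_of_length_eq_zero (Nat.le_zero.mp hl)
      subst hnil
      rw [runsB_nil]
      rfl
  | succ n ih =>
      intro ys hl hp
      cases ys with
      | nil => rw [runsB_nil]; rfl
      | cons k t =>
          have hpt : t.Pairwise (· ≤ ·) := (List.pairwise_cons.mp hp).2
          set a := t.takeWhile (fun y => y == k) with ha
          set b := t.dropWhile (fun y => y == k) with hb
          have hta : a ++ b = t := List.takeWhile_append_dropWhile
          have hak : ∀ x ∈ a, x = k := by
            intro x hx
            have := List.mem_takeWhile_imp hx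
            simpa using this
          have hkb : ∀ x ∈ b, k < x := dropWhile_gt t hp
          have hknb : k ∉ b := fun hk => lt_irrefl k (hkb k hk)
          have hpb : b.Pairwise (· ≤ ·) := hpt.sublist (List.dropWhile_sublist _)
          have hbl : b.length ≤ n := by
            have h1 : b.length ≤ t.length := List.Sublist.length_le (List.dropWhile_sublist _)
            have h2 : t.length + 1 ≤ n + 1 := by simpa using hl
            omega
          have hIH := ih b hbl hpb
          -- the sorted distinct values of k :: t are k followed by those of b
          have hS : PySem.List.sorted (PySem.Set.ofList (k :: t)) (fun x => x) false
              = k :: PySem.List.sorted (PySem.Set.ofList b) (fun x => x) false := by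
            apply PySem.List.sorted_eq_of_perm_of_pairwise_lt
            · have hnd1 : (k :: PySem.List.sorted (PySem.Set.ofList b) (fun x => x) false).Nodup := by
                refine List.nodup_cons.mpr ⟨?_, ?_⟩
                · intro hk
                  exact hknb (by simpa [PySem.List.mem_sorted, PySem.Set.mem_ofList] using hk)
                · exact ((PySem.List.sorted_perm _ _ _).nodup_iff).mpr (PySem.Set.nodup_ofList b)
              refine (List.perm_ext_iff_of_nodup hnd1 (PySem.Set.nodup_ofList _)).mpr ?_
              intro z
              simp only [List.mem_cons, PySem.List.mem_sorted, PySem.Set.mem_ofList]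
              constructor
              · rintro (rfl | hz)
                · exact Or.inl rfl
                · exact Or.inr (by rw [← hta]; exact List.mem_append_right a hz)
              · rintro (rfl | hz)
                · exact Or.inl rfl
                · rw [← hta] at hz
                  rcases List.mem_append.mp hz with hz | hz
                  · exact Or.inl (hak z hz)
                  · exact Or.inr hz
            · refine List.pairwise_cons.mpr ⟨?_, ?_⟩
              · intro z hz
                exact hkb z (by simpa [PySem.List.mem_sorted, PySem.Set.mem_ofList] using hz)
              · exact PySem.List.sorted_ofList_pairwise_lt b
          have hcnt_k : (k :: t).count k = 1 + a.length := by
            rw [← hta, List.count_cons_self, List.count_append]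
            have h1 : a.count k = a.length := List.count_eq_length.mpr (fun z hz => (hak z hz).symm)
            have h2 : b.count k = 0 := List.count_eq_zero.mpr hknb
            omega
          have hcnt_ne : ∀ z ∈ b, (k :: t).count z = b.count z := by
            intro z hz
            have hzk : z ≠ k := fun he => hknb (he ▸ hz)
            have h1 : a.count z = 0 := List.count_eq_zero.mpr (fun hza => hzk (hak z hza))
            rw [← hta]
            simp [List.count_append, h1, Ne.symm hzk]
          rw [runsB_cons, hS, hIH]
          simp only [List.map_cons]
          congr 1
          · rw [show (t.takeWhile (fun x => x == k)) = a from rfl]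
            rw [hcnt_k]
            push_cast
            ring_nf
          · refine List.map_congr_left ?_
            intro z hz
            have hzb : z ∈ b := by simpa [PySem.List.mem_sorted, PySem.Set.mem_ofList] using hz
            simp [hcnt_ne z hzb]

theorem runsB_sorted (ys : List String) (hp : ys.Pairwise (· ≤ ·)) :
    runsB ys = (PySem.List.sorted (PySem.Set.ofList ys) (fun x => x) false).map
      (fun k => (k, (ys.count k : Int))) :=
  runsB_sorted_aux ys.length ys (le_refl _) hp

theorem per_key (xs : List String) :
    PySem.List.sorted2 (PySem.Dict.counter xs).items Prod.fst Prod.snd false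
      = runsB (PySem.List.sorted xs (fun x => x) false) := by
  have hitems : (PySem.Dict.counter xs).items
      = (PySem.Set.ofList xs).map (fun k => (k, (xs.count k : Int))) :=
    PySem.Dict.items_counter xs
  have hndfst : ((PySem.Dict.counter xs).items.map Prod.fst).Nodup := by
    rw [hitems, List.map_map]
    have hcomp : (Prod.fst ∘ fun k : String => (k, (xs.count k : Int))) = id := rfl
    rw [hcomp, List.map_id]
    exact PySem.Set.nodup_ofList xs
  rw [sorted2_eq_sorted_fst _ _ _ hndfst]
  have hC : PySem.List.sorted (PySem.Dict.counter xs).items Prod.fst false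
      = (PySem.List.sorted (PySem.Set.ofList xs) (fun x => x) false).map
          (fun k => (k, (xs.count k : Int))) := by
    apply PySem.List.sorted_eq_of_perm_of_pairwise_lt
    · rw [hitems]
      exact (PySem.List.sorted_perm _ _ _).map _
    · have hpl := PySem.List.sorted_ofList_pairwise_lt xs
      exact List.Pairwise.map _ (fun a b h => h) hpl
  rw [hC, runsB_sorted _ (PySem.List.sorted_pairwise xs (fun x => x))]
  have hperm : (PySem.Set.ofList (PySem.List.sorted xs (fun x => x) false)).Perm
      (PySem.Set.ofList xs) := by
    refine (List.perm_ext_iff_of_nodup (PySem.Set.nodup_ofList _) (PySem.Set.nodup_ofList _)).mpr ?_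
    intro z
    simp [PySem.Set.mem_ofList, PySem.List.mem_sorted]
  rw [PySem.List.sorted_eq_sorted_of_perm _ _ _ (fun _ _ h => h) hperm]
  refine List.map_congr_left ?_
  intro z _
  have : (PySem.List.sorted xs (fun x => x) false).count z = xs.count z :=
    (PySem.List.sorted_perm _ _ _).count_eq z
  simp [this]

-- ===== VERDICT (by name: the statement is the Claim_ definition above) =====
theorem issue_summary_py_spec : Claim_equal_issue_summary_py := by
  intro issues _ _
  show issue_summary_py issues = issue_summary_py_alt issues
  unfold issue_summary_py issue_summary_py_alt tallyB
  rw [fold_split issues PySem.Dict.empty PySem.Dict.empty,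
      foldl_insert_key_eq_counter issues (fun issue => pyLookup issue "stage"),
      foldl_insert_key_eq_counter issues (fun issue => pyLookup issue "code")]
  simp only [per_key]
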